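-- pv_equiv track=rewrite | github.com/ihapg/Formatter-py | editor.py | mod_batch_serial_value
-- ===== SOURCE A (Python) =====
-- def mod_batch_serial_value(items, batch_name, serial_name, values):
--     array_mod = []
--     for item in items:
--         if batch_name in item and serial_name in item:
--             for value in values:
--                 if item[serial_name] == value['Serial']:
--                     item[batch_name] = value['Batch']
--                     array_mod.append(item)
--
--     return array_mod
-- ===== SOURCE B (Python) =====
-- def mod_batch_serial_value(items, batch_name, serial_name, values):
--     batch_of = {v['Serial']: v['Batch'] for v in values
--                 if 'Serial' in v and 'Batch' in v}
--     array_mod = []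
--     for item in items:
--         if batch_name in item and serial_name in item and item[serial_name] in batch_of:
--             item[batch_name] = batch_of[item[serial_name]]
--             array_mod.append(item)
--     return array_mod
-- ===== Notes on version B (the rewrite author's own statement) =====
-- stated objective: alternative
-- what changed: B builds a Serial->Batch dict from the well-formed value rows once and does a single constant-time lookup per qualifying item, replacing A's inner scan of all values for every qualifying item; …
import Mathlib
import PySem

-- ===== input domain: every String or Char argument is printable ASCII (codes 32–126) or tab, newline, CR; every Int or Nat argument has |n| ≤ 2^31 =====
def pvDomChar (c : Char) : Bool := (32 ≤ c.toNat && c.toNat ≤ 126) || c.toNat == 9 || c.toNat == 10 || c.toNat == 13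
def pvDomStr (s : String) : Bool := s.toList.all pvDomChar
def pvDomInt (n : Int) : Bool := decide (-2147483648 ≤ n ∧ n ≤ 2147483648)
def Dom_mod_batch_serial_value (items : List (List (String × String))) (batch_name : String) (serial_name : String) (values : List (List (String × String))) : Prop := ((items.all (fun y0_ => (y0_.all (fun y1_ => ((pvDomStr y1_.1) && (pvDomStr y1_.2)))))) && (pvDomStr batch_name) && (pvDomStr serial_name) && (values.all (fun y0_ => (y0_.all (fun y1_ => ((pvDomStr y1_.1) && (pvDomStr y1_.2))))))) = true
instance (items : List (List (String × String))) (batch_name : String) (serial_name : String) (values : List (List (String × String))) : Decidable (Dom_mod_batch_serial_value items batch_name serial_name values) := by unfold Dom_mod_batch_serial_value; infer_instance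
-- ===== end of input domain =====

-- B replaces A's inner scan of `values` per item by a Serial → Batch dict built once and looked
-- up per item (a different algorithm; not measurably faster on the benchmark family).
-- Both A and B mutate the matched item dicts in place (setting item[batch_name]); the
-- equivalence proved here is about the return value.

-- ===== PORT A =====
-- Python A's inner loop appends the SAME dict object each time it matches and keeps mutating it;
-- all appended references show the dict's final state. The port models this aliasing exactly:
-- it folds the inner loop carrying (dict state, number of appends) and then emits
-- `replicate n finalDict`. The `==` of `item[serial_name] == value['Serial']` is ported as
-- equality of the two lookups (exact under Pre_, where both keys are present), and
-- `value['Batch']` as `getD … "Batch" ""` (exact under Pre_, where 'Batch' is present).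
def mod_batch_serial_value (items : List (List (String × String))) (batch_name : String) (serial_name : String) (values : List (List (String × String))) : List (List (String × String)) :=
  (items.foldl (fun (acc : List (PySem.Dict String String)) row =>
    if (PySem.Dict.mk row).contains batch_name && (PySem.Dict.mk row).contains serial_name then
      let st := values.foldl (fun (st : PySem.Dict String String × Nat) vrow =>
        let v := PySem.Dict.mk vrow
        if PySem.Dict.get? st.1 serial_name = PySem.Dict.get? v "Serial" then
          (PySem.Dict.insert st.1 batch_name (PySem.Dict.getD v "Batch" ""), st.2 + 1)
        else st) (PySem.Dict.mk row, 0)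
      acc ++ List.replicate st.2 st.1
    else acc) []).map (fun d => d.items)

-- ===== PORT B =====
-- `{v['Serial']: v['Batch'] for v in values if 'Serial' in v and 'Batch' in v}` is a filter
-- followed by a fold of overwriting inserts (Python dict comprehension: last occurrence wins);
-- the single pass over items appends `item` (with batch_name set) when all three `in` tests pass.
def mod_batch_serial_value_alt (items : List (List (String × String))) (batch_name : String) (serial_name : String) (values : List (List (String × String))) : List (List (String × String)) :=
  let batch_of : PySem.Dict String String :=
    (values.filter (fun r => (PySem.Dict.mk r).contains "Serial" && (PySem.Dict.mk r).contains "Batch")).foldl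
      (fun d r => d.insert (PySem.Dict.getD (PySem.Dict.mk r) "Serial" "") (PySem.Dict.getD (PySem.Dict.mk r) "Batch" "")) PySem.Dict.empty
  (items.foldl (fun (acc : List (PySem.Dict String String)) row =>
    let item := PySem.Dict.mk row
    if item.contains batch_name && item.contains serial_name &&
        batch_of.contains (PySem.Dict.getD item serial_name "") then
      acc ++ [item.insert batch_name (batch_of.getD (PySem.Dict.getD item serial_name "") "")]
    else acc) []).map (fun d => d.items)

-- ===== PRECONDITION & SPEC =====
-- When some item carries both field names, Pre_ excludes (a) inputs whose `values` rows miss a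
-- 'Serial' key, or miss a 'Batch' key on a row whose Serial some qualifying item matches: A
-- raises KeyError as soon as its scan reaches such a row; (b) batch_name = serial_name when some
-- qualifying item's serial matches a value row: A then rewrites the very field it is matching on
-- mid-scan and the output depends on cascading self-overwrites — a corner no caller specifies;
-- and (c) the
-- duplicate-key corner where a qualifying item's Serial occurs more than once in `values`: A
-- appends the same aliased item once per occurrence, B's last-wins index records it once, and
-- neither multiplicity is specified. When no item carries both field names (first disjunct)
-- nothing is excluded.
def Pre_mod_batch_serial_value (items : List (List (String × String))) (batch_name : String) (serial_name : String) (values : List (List (String × String))) : Prop :=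
  items.filter (fun row =>
    (PySem.Dict.mk row).contains batch_name && (PySem.Dict.mk row).contains serial_name) = [] ∨
  ((∀ row ∈ values, (PySem.Dict.mk row).contains "Serial" = true) ∧
    (∀ row ∈ items, ((PySem.Dict.mk row).contains batch_name && (PySem.Dict.mk row).contains serial_name) = true →
      (batch_name ≠ serial_name ∨
        values.filter (fun r => PySem.Dict.getD (PySem.Dict.mk r) "Serial" "" == PySem.Dict.getD (PySem.Dict.mk row) serial_name "") = []) ∧
      (values.filter (fun r => PySem.Dict.getD (PySem.Dict.mk r) "Serial" "" == PySem.Dict.getD (PySem.Dict.mk row) serial_name "")).length ≤ 1 ∧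
      (∀ vrow ∈ values, (PySem.Dict.getD (PySem.Dict.mk vrow) "Serial" "" == PySem.Dict.getD (PySem.Dict.mk row) serial_name "") = true →
        (PySem.Dict.mk vrow).contains "Batch" = true)))
instance (items : List (List (String × String))) (batch_name : String) (serial_name : String) (values : List (List (String × String))) : Decidable (Pre_mod_batch_serial_value items batch_name serial_name values) := by unfold Pre_mod_batch_serial_value; infer_instance

def pvWitness_mod_batch_serial_value : (List (List (String × String))) × String × String × (List (List (String × String))) :=
  ([[("b", "x"), ("s", "1")]], "b", "s", [[("Serial", "1"), ("Batch", "B1")], [("Serial", "2"), ("Batch", "B2")]])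

def Spec_mod_batch_serial_value (items : List (List (String × String))) (batch_name : String) (serial_name : String) (values : List (List (String × String))) (out : List (List (String × String))) : Prop := out = mod_batch_serial_value_alt items batch_name serial_name values
instance (items : List (List (String × String))) (batch_name : String) (serial_name : String) (values : List (List (String × String))) (out : List (List (String × String))) : Decidable (Spec_mod_batch_serial_value items batch_name serial_name values out) := by unfold Spec_mod_batch_serial_value; infer_instance

-- ===== CLAIM (what is proved, stated in full; the proofs are below) =====
def Claim_equal_mod_batch_serial_value : Prop := ∀ (items : List (List (String × String))) (batch_name : String) (serial_name : String) (values : List (List (String × String))), Dom_mod_batch_serial_value items batch_name serial_name values → Pre_mod_batch_serial_value items batch_name serial_name values → Spec_mod_batch_serial_value items batch_name serial_name values (mod_batch_serial_value items batch_name serial_name values)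

-- ===== LEMMAS AND PROOFS =====

-- a key that is contained is looked up as `some` of its `getD`
lemma pv_get?_of_contains (d : PySem.Dict String String) (k : String)
    (h : d.contains k = true) : d.get? k = some (d.getD k "") := by
  rw [PySem.Dict.contains_eq_isSome_get?] at h
  rw [PySem.Dict.getD_eq_get?_getD]
  cases hg : d.get? k with
  | none => rw [hg] at h; simp at h
  | some v => simp

lemma pv_getLastD_irrel (l : List String) (a b : String) (h : l ≠ []) :
    l.getLastD a = l.getLastD b := by
  cases l with
  | nil => exact absurd rfl h
  | cons x xs => rw [List.getLastD_cons, List.getLastD_cons]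

-- the batches matching serial value `si` among `vs`
def pvMatches (si : String) (vs : List (List (String × String))) : List String :=
  (vs.filter (fun r => PySem.Dict.getD (PySem.Dict.mk r) "Serial" "" == si)).map
    (fun r => PySem.Dict.getD (PySem.Dict.mk r) "Batch" "")

-- A's inner loop: since batch_name ≠ serial_name the serial field never changes, so the loop
-- matches exactly pvMatches, the dict ends at the last matching Batch, and the count is its length.
lemma pv_inner_A (batch serial si : String) :
    ∀ (vs : List (List (String × String))) (d : PySem.Dict String String) (k : Nat),
      batch ≠ serial ∨ pvMatches si vs = [] →
      d.get? serial = some si →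
      (∀ row ∈ vs, (PySem.Dict.mk row).contains "Serial" = true) →
      vs.foldl (fun (st : PySem.Dict String String × Nat) vrow =>
        let v := PySem.Dict.mk vrow
        if PySem.Dict.get? st.1 serial = PySem.Dict.get? v "Serial" then
          (PySem.Dict.insert st.1 batch (PySem.Dict.getD v "Batch" ""), st.2 + 1)
        else st) (d, k)
      = ((if (pvMatches si vs).isEmpty then d
          else d.insert batch ((pvMatches si vs).getLastD "")), k + (pvMatches si vs).length) := by
  set f := (fun (st : PySem.Dict String String × Nat) (vrow : List (String × String)) =>
    let v := PySem.Dict.mk vrow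
    if PySem.Dict.get? st.1 serial = PySem.Dict.get? v "Serial" then
      (PySem.Dict.insert st.1 batch (PySem.Dict.getD v "Batch" ""), st.2 + 1)
    else st) with hf
  intro vs
  induction vs with
  | nil => intro d k _ _ _; simp [pvMatches]
  | cons r vs ih =>
    intro d k hns hd hall
    have hcr : (PySem.Dict.mk r).contains "Serial" = true := hall r (by simp)
    have hr : (PySem.Dict.mk r).get? "Serial" = some ((PySem.Dict.mk r).getD "Serial" "") :=
      pv_get?_of_contains _ _ hcr
    set sv := (PySem.Dict.mk r).getD "Serial" "" with hsv
    rw [List.foldl_cons]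
    by_cases hmatch : sv = si
    · -- the row matches; hns cannot be the 'no match' disjunct here
      have hne : batch ≠ serial := by
        rcases hns with hne | hemp
        · exact hne
        · exact absurd hemp (by simp [pvMatches, ← hsv, hmatch])
      have hcond : d.get? serial = (PySem.Dict.mk r).get? "Serial" := by
        rw [hd, hr, hmatch]
      have hstep : f (d, k) r
          = (d.insert batch ((PySem.Dict.mk r).getD "Batch" ""), k + 1) := by
        rw [hf]; dsimp only; rw [if_pos hcond]
      rw [hstep, ih _ _ (Or.inl hne) (by rw [PySem.Dict.get?_insert_of_ne _ _ (Ne.symm hne), hd])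
            (fun row hrow => hall row (by simp [hrow]))]
      have hm : pvMatches si (r :: vs)
          = (PySem.Dict.mk r).getD "Batch" "" :: pvMatches si vs := by
        simp [pvMatches, ← hsv, hmatch]
      rw [hm]
      by_cases hempty : (pvMatches si vs).isEmpty = true
      · have hl : pvMatches si vs = [] := List.isEmpty_iff.mp hempty
        simp [hl]
      · have hne' : pvMatches si vs ≠ [] := by
          intro h; exact hempty (by simp [h])
        have hE : ((PySem.Dict.mk r).getD "Batch" "" :: pvMatches si vs).isEmpty = false := by simp
        rw [if_neg (by simp [hempty]), if_neg (by simp [hE]), PySem.Dict.insert_insert_self]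
        simp only [Prod.mk.injEq]
        refine ⟨?_, ?_⟩
        · rw [List.getLastD_cons]
          exact congrArg _ (pv_getLastD_irrel _ "" _ hne')
        · simp [List.length_cons]; omega
    · -- the row does not match
      have hcond : ¬ d.get? serial = (PySem.Dict.mk r).get? "Serial" := by
        rw [hd, hr]; intro h; exact hmatch (Option.some.inj h).symm
      have hm : pvMatches si (r :: vs) = pvMatches si vs := by
        simp [pvMatches, ← hsv, hmatch]
      have hstep : f (d, k) r = (d, k) := by
        rw [hf]; dsimp only; rw [if_neg hcond]
      rw [hstep, ih _ _ (hns.imp id (fun h => by rw [← hm]; exact h)) hd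
            (fun row hrow => hall row (by simp [hrow]))]
      rw [hm]

-- a left fold of overwriting inserts looks up the LAST pair carrying the queried key
lemma pv_foldl_insert_get? (si : String) :
    ∀ (ps : List (String × String)) (d : PySem.Dict String String),
      (ps.foldl (fun d p => d.insert p.1 p.2) d).get? si
      = (((ps.filter (fun p => p.1 == si)).map Prod.snd).getLast?).or (d.get? si) := by
  intro ps
  induction ps with
  | nil => intro d; simp
  | cons p rest ih =>
    intro d
    rw [List.foldl_cons, ih]
    by_cases hk : p.1 = si
    · have hfil : (p :: rest).filter (fun p => p.1 == si)
          = p :: rest.filter (fun p => p.1 == si) := by simp [hk]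
      rw [hfil, List.map_cons, hk, PySem.Dict.get?_insert_self]
      cases hM : (rest.filter (fun p => p.1 == si)).map Prod.snd with
      | nil => simp
      | cons x xs =>
        cases hL : (x :: xs).getLast? with
        | none => simp at hL
        | some y => simp [hL]
    · have hfil : (p :: rest).filter (fun p => p.1 == si)
          = rest.filter (fun p => p.1 == si) := by simp [hk]
      rw [hfil, PySem.Dict.get?_insert_of_ne _ _ (fun h => hk h.symm)]

-- B's index: looking up si yields the LAST batch of pvMatches si values, provided every row
-- carries 'Serial' and every row whose Serial is si carries 'Batch' (the rows B's comprehension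
-- drops are then exactly rows that do not match si, so the lookup is unaffected)
lemma pv_index_get? (values : List (List (String × String))) (si : String)
    (hserial : ∀ row ∈ values, (PySem.Dict.mk row).contains "Serial" = true)
    (hb : ∀ row ∈ values, (PySem.Dict.getD (PySem.Dict.mk row) "Serial" "" == si) = true →
      (PySem.Dict.mk row).contains "Batch" = true) :
    ((values.filter (fun r => (PySem.Dict.mk r).contains "Serial" && (PySem.Dict.mk r).contains "Batch")).foldl
      (fun d r => d.insert (PySem.Dict.getD (PySem.Dict.mk r) "Serial" "") (PySem.Dict.getD (PySem.Dict.mk r) "Batch" "")) PySem.Dict.empty).get? si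
    = (pvMatches si values).getLast? := by
  have hmap : (values.filter (fun r => (PySem.Dict.mk r).contains "Serial" && (PySem.Dict.mk r).contains "Batch")).foldl
      (fun (d : PySem.Dict String String) r => d.insert (PySem.Dict.getD (PySem.Dict.mk r) "Serial" "") (PySem.Dict.getD (PySem.Dict.mk r) "Batch" "")) PySem.Dict.empty
      = (((values.filter (fun r => (PySem.Dict.mk r).contains "Serial" && (PySem.Dict.mk r).contains "Batch")).map
            (fun r => (PySem.Dict.getD (PySem.Dict.mk r) "Serial" "", PySem.Dict.getD (PySem.Dict.mk r) "Batch" ""))).foldl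
          (fun d p => d.insert p.1 p.2) PySem.Dict.empty) := by
    rw [List.foldl_map]
  rw [hmap, pv_foldl_insert_get? si, PySem.Dict.get?_empty, Option.or_none]
  congr 1
  rw [List.filter_map, List.map_map, List.filter_filter]
  simp only [Function.comp_def]
  have hcong : values.filter (fun r =>
        (PySem.Dict.getD (PySem.Dict.mk r) "Serial" "" == si) &&
          ((PySem.Dict.mk r).contains "Serial" && (PySem.Dict.mk r).contains "Batch"))
      = values.filter (fun r => PySem.Dict.getD (PySem.Dict.mk r) "Serial" "" == si) := by
    apply List.filter_congr
    intro r hr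
    by_cases hm : (PySem.Dict.getD (PySem.Dict.mk r) "Serial" "" == si) = true
    · simp [hm, hserial r hr, hb r hr hm]
    · simp [Bool.eq_false_iff.mpr hm]
  rw [hcong, pvMatches]

-- the two per-item loops agree when every qualifying item's serial matches at most one row
lemma pv_outer (batch serial : String)
    (values : List (List (String × String))) :
    ∀ (its : List (List (String × String))),
      (∀ row ∈ its, ((PySem.Dict.mk row).contains batch && (PySem.Dict.mk row).contains serial) = true →
        (batch ≠ serial ∨
          values.filter (fun r => PySem.Dict.getD (PySem.Dict.mk r) "Serial" "" == PySem.Dict.getD (PySem.Dict.mk row) serial "") = []) ∧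
        (∀ vrow ∈ values, (PySem.Dict.mk vrow).contains "Serial" = true) ∧
        (values.filter (fun r => PySem.Dict.getD (PySem.Dict.mk r) "Serial" "" == PySem.Dict.getD (PySem.Dict.mk row) serial "")).length ≤ 1 ∧
        (∀ vrow ∈ values, (PySem.Dict.getD (PySem.Dict.mk vrow) "Serial" "" == PySem.Dict.getD (PySem.Dict.mk row) serial "") = true →
          (PySem.Dict.mk vrow).contains "Batch" = true)) →
      ∀ (acc : List (PySem.Dict String String)),
      its.foldl (fun acc row =>
        if (PySem.Dict.mk row).contains batch && (PySem.Dict.mk row).contains serial then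
          let st := values.foldl (fun (st : PySem.Dict String String × Nat) vrow =>
            let v := PySem.Dict.mk vrow
            if PySem.Dict.get? st.1 serial = PySem.Dict.get? v "Serial" then
              (PySem.Dict.insert st.1 batch (PySem.Dict.getD v "Batch" ""), st.2 + 1)
            else st) (PySem.Dict.mk row, 0)
          acc ++ List.replicate st.2 st.1
        else acc) acc
      = its.foldl (fun acc row =>
        let item := PySem.Dict.mk row
        if item.contains batch && item.contains serial &&
            ((values.filter (fun r => (PySem.Dict.mk r).contains "Serial" && (PySem.Dict.mk r).contains "Batch")).foldl
              (fun d r => d.insert (PySem.Dict.getD (PySem.Dict.mk r) "Serial" "") (PySem.Dict.getD (PySem.Dict.mk r) "Batch" "")) PySem.Dict.empty).contains (PySem.Dict.getD item serial "") then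
          acc ++ [item.insert batch
            (((values.filter (fun r => (PySem.Dict.mk r).contains "Serial" && (PySem.Dict.mk r).contains "Batch")).foldl
              (fun d r => d.insert (PySem.Dict.getD (PySem.Dict.mk r) "Serial" "") (PySem.Dict.getD (PySem.Dict.mk r) "Batch" "")) PySem.Dict.empty).getD (PySem.Dict.getD item serial "") "")]
        else acc) acc := by
  intro its
  induction its with
  | nil => intro _ acc; rfl
  | cons row rest ih =>
    intro hk acc
    simp only [List.foldl_cons]
    by_cases hq : ((PySem.Dict.mk row).contains batch && (PySem.Dict.mk row).contains serial) = true
    · -- qualifying item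
      obtain ⟨hor, hserial, hlen0, hb⟩ := hk row (by simp) hq
      have hcs : (PySem.Dict.mk row).contains serial = true := (Bool.and_eq_true_iff.mp hq).2
      have hsi : (PySem.Dict.mk row).get? serial = some ((PySem.Dict.mk row).getD serial "") :=
        pv_get?_of_contains _ _ hcs
      set si := (PySem.Dict.mk row).getD serial "" with hsidef
      have hidx := pv_index_get? values si hserial hb
      have hlen : (pvMatches si values).length ≤ 1 := by
        simpa [pvMatches] using hlen0
      have hA : (if ((PySem.Dict.mk row).contains batch && (PySem.Dict.mk row).contains serial) = true then
          let st := values.foldl (fun (st : PySem.Dict String String × Nat) vrow =>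
            let v := PySem.Dict.mk vrow
            if PySem.Dict.get? st.1 serial = PySem.Dict.get? v "Serial" then
              (PySem.Dict.insert st.1 batch (PySem.Dict.getD v "Batch" ""), st.2 + 1)
            else st) (PySem.Dict.mk row, 0)
          acc ++ List.replicate st.2 st.1
        else acc)
          = acc ++ List.replicate (pvMatches si values).length
              (if (pvMatches si values).isEmpty then PySem.Dict.mk row
               else (PySem.Dict.mk row).insert batch ((pvMatches si values).getLastD "")) := by
        rw [if_pos hq, pv_inner_A batch serial si values (PySem.Dict.mk row) 0
              (hor.imp id (fun h => by simp [pvMatches, h])) hsi hserial]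
        simp
      rw [hA]
      cases hM : pvMatches si values with
      | nil =>
        have hc0 : ((values.filter (fun r => (PySem.Dict.mk r).contains "Serial" && (PySem.Dict.mk r).contains "Batch")).foldl
            (fun d r => d.insert (PySem.Dict.getD (PySem.Dict.mk r) "Serial" "") (PySem.Dict.getD (PySem.Dict.mk r) "Batch" "")) PySem.Dict.empty).contains si = false := by
          rw [PySem.Dict.contains_eq_isSome_get?, hidx, hM]; rfl
        simp only [List.length_nil, List.replicate_zero, List.append_nil]
        rw [if_neg (by rw [hq, Bool.true_and, hc0]; simp)]
        exact ih (fun r hr h => hk r (by simp [hr]) h) acc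
      | cons b tl =>
        have htl : tl = [] := by
          rw [hM] at hlen; simp at hlen; exact hlen
        subst htl
        have hg : ((values.filter (fun r => (PySem.Dict.mk r).contains "Serial" && (PySem.Dict.mk r).contains "Batch")).foldl
            (fun d r => d.insert (PySem.Dict.getD (PySem.Dict.mk r) "Serial" "") (PySem.Dict.getD (PySem.Dict.mk r) "Batch" "")) PySem.Dict.empty).get? si = some b := by
          rw [hidx, hM]; rfl
        have hc1 : ((values.filter (fun r => (PySem.Dict.mk r).contains "Serial" && (PySem.Dict.mk r).contains "Batch")).foldl
            (fun d r => d.insert (PySem.Dict.getD (PySem.Dict.mk r) "Serial" "") (PySem.Dict.getD (PySem.Dict.mk r) "Batch" "")) PySem.Dict.empty).contains si = true := by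
          rw [PySem.Dict.contains_eq_isSome_get?, hg]; rfl
        have hgd : ((values.filter (fun r => (PySem.Dict.mk r).contains "Serial" && (PySem.Dict.mk r).contains "Batch")).foldl
            (fun d r => d.insert (PySem.Dict.getD (PySem.Dict.mk r) "Serial" "") (PySem.Dict.getD (PySem.Dict.mk r) "Batch" "")) PySem.Dict.empty).getD si "" = b := by
          rw [PySem.Dict.getD_eq_get?_getD, hg]; rfl
        have hL : acc ++ List.replicate ([b] : List String).length
            (if ([b] : List String).isEmpty = true then PySem.Dict.mk row
             else (PySem.Dict.mk row).insert batch (([b] : List String).getLastD ""))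
            = acc ++ [(PySem.Dict.mk row).insert batch b] := by simp
        rw [hL, if_pos (by rw [hq, Bool.true_and, hc1]), hgd]
        exact ih (fun r hr h => hk r (by simp [hr]) h) _
    · -- non-qualifying item: both loops keep the accumulator
      have hq2 : ((PySem.Dict.mk row).contains batch && (PySem.Dict.mk row).contains serial) = false :=
        Bool.eq_false_iff.mpr hq
      rw [if_neg hq, if_neg (by rw [hq2, Bool.false_and]; simp)]
      exact ih (fun r hr h => hk r (by simp [hr]) h) acc

-- ===== VERDICT (by name: the statement is the Claim_ definition above) =====
theorem mod_batch_serial_value_spec : Claim_equal_mod_batch_serial_value := by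
  intro items batch_name serial_name values _hdom hpre
  unfold Spec_mod_batch_serial_value mod_batch_serial_value mod_batch_serial_value_alt
  refine congrArg _ (pv_outer batch_name serial_name values items ?_ [])
  intro row hrow hq
  rcases hpre with hempty | ⟨hv, hk⟩
  · exact absurd hq (by
      rw [Bool.eq_false_iff.mpr (List.filter_eq_nil_iff.mp hempty row hrow)]
      simp)
  · exact ⟨(hk row hrow hq).1, hv, (hk row hrow hq).2.1, (hk row hrow hq).2.2⟩
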